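-- pv_equiv track=rewrite | github.com/tiga1231/docqa-analysis | docqa/run/util.py | make_tok_to_char
-- ===== SOURCE A (Python) =====
-- def get_preimages(tok):
--   """Get possible pre-images of token.
--
--   Necessary because of clean_text() inside NltkAndPunctTokenizer
--   inside docqa.data_processing.text_utils
--   """
--   if tok == '\"':
--     return ["''", '``', '\"']
--   elif tok == '-':
--     return ['\u2212', '-']
--   elif tok == '\u2013':
--     return ['\u2014', '\u2013']
--   return [tok]
--
-- def make_tok_to_char(document, tokens):
--   tok_to_char = []
--   i = 0
--   for t in tokens:
--     preimages = get_preimages(t)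
--     while True:
--       matches = [x for x in preimages if document[i:i+len(x)] == x]
--       if matches: break
--       i += 1
--       if i > len(document): raise Exception
--     tok_to_char.append(i)
--     i += len(matches[0])
--   tok_to_char.append(i)  # After the last token
--   return tok_to_char
-- ===== SOURCE B (Python) =====
-- def get_preimages(tok):
--   """Get possible pre-images of token (mirrors clean_text substitutions)."""
--   if tok == '\"':
--     return ["''", '``', '\"']
--   elif tok == '-':
--     return ['\u2212', '-']
--   elif tok == '\u2013':
--     return ['\u2014', '\u2013']
--   return [tok]
--
-- def make_tok_to_char(document, tokens):
--   tok_to_char = []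
--   i = 0
--   for t in tokens:
--     preimages = get_preimages(t)
--     positions = [p for p in (document.find(x, i) for x in preimages) if p != -1]
--     if not positions:
--       raise Exception
--     p = min(positions)
--     x = next(x for x in preimages if document[p:p+len(x)] == x)
--     tok_to_char.append(p)
--     i = p + len(x)
--   tok_to_char.append(i)
--   return tok_to_char
-- ===== Notes on version B (the rewrite author's own statement) =====
-- stated objective: idiomatic
-- what changed: A's hand-written while-loop that re-tests every preimage at each character position is replaced by one str.find substring search per preimage plus min() to pick the earliest occurrence, then a single slice comparison to pick the advancing preimage.
import Mathlib
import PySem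

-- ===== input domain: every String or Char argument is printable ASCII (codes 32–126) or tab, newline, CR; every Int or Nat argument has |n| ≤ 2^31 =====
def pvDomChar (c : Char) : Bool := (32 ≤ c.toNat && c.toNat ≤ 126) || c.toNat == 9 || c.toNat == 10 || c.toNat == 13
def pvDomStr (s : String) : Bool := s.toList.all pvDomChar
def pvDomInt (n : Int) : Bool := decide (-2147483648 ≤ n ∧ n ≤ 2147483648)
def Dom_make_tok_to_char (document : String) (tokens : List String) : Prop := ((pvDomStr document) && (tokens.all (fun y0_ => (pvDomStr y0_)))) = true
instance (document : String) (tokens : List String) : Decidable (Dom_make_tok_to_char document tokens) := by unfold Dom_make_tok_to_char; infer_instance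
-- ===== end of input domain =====

-- B replaces A's char-by-char scanning while-loop by per-preimage substring search
-- (str.find) + min, keeping the same greedy left-to-right alignment (idiomatic rewrite).


-- ===== PORT A =====
-- get_preimages, identical helper in both Python sources
def get_preimages (tok : String) : List String :=
  if tok = "\"" then ["''", "``", "\""]
  else if tok = "-" then ["\u2212", "-"]
  else if tok = "\u2013" then ["\u2014", "\u2013"]
  else [tok]

-- matches = [x for x in preimages if document[i:i+len(x)] == x]; i is a Nat here
-- (Python's i starts at 0 and only grows), so the slice document[i:i+len(x)] is
-- exactly (drop i).take (len x).
def pvMatchesAt (doc : List Char) (i : Nat) (pres : List (List Char)) : List (List Char) :=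
  pres.filter (fun x => (doc.drop i).take x.length == x)

-- A's inner 'while True' loop: try i, else i += 1; raise (none) when i > len(document).
def pvScanA (doc : List Char) (pres : List (List Char)) (i : Nat) : Option Nat :=
  if pvMatchesAt doc i pres ≠ [] then some i
  else if doc.length < i + 1 then none
  else pvScanA doc pres (i + 1)
termination_by doc.length + 1 - i
decreasing_by omega

-- A's 'for t in tokens' loop; 'raise Exception' is modelled as none.
def pvLoopA (doc : List Char) (i : Nat) : List String → Option (List Nat)
  | [] => some [i]
  | t :: ts =>
    let pres := (get_preimages t).map String.toList
    match pvScanA doc pres i with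
    | none => none
    | some j =>
      match pvMatchesAt doc j pres with
      | [] => none
      | x :: _ => (pvLoopA doc (j + x.length) ts).map (fun r => j :: r)

-- a raising run (outside Pre_) is rendered as []
def make_tok_to_char (document : String) (tokens : List String) : List Int :=
  ((pvLoopA document.toList 0 tokens).getD []).map Int.ofNat

-- ===== PORT B =====
-- one token of B: positions = [document.find(x, i) for x in preimages if ... != -1];
-- p = min(positions); x = first preimage with document[p:p+len(x)] == x.
def pvStepB (doc : List Char) (i : Int) (pres : List (List Char)) : Option (Int × Nat) :=
  let positions := (pres.map (fun x => PySem.Chars.findFrom doc x i)).filter (fun p => p != -1)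
  match PySem.List.min? positions id with
  | none => none                -- 'if not positions: raise Exception'
  | some p =>
    match pres.find? (fun x => PySem.List.slice doc (some p) (some (p + (x.length : Int))) == x) with
    | none => none              -- unreachable: some preimage matches at p
    | some x => some (p, x.length)

def pvLoopB (doc : List Char) (i : Int) : List String → Option (List Int)
  | [] => some [i]
  | t :: ts =>
    match pvStepB doc i ((get_preimages t).map String.toList) with
    | none => none
    | some (p, l) => (pvLoopB doc (p + (l : Int)) ts).map (fun r => p :: r)

def make_tok_to_char_alt (document : String) (tokens : List String) : List Int :=
  (pvLoopB document.toList 0 tokens).getD []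

-- ===== PRECONDITION & SPEC =====
-- Pre_ excludes exactly the inputs on which Python A raises its Exception: it holds iff
-- some choice of preimages of the tokens occurs in the document, in order, without
-- overlap (a declarative existential alignment check, not the greedy scan of either port).
def pvCanAlign : List Char → List String → Bool
  | _, [] => true
  | cs, t :: ts =>
    (List.range (cs.length + 1)).any (fun n =>
      (get_preimages t).any (fun x =>
        ((cs.drop n).take x.toList.length == x.toList) &&
          pvCanAlign ((cs.drop n).drop x.toList.length) ts))

def Pre_make_tok_to_char (document : String) (tokens : List String) : Prop :=
  pvCanAlign document.toList tokens = true
instance (document : String) (tokens : List String) : Decidable (Pre_make_tok_to_char document tokens) := by unfold Pre_make_tok_to_char; infer_instance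

def pvWitness_make_tok_to_char : String × List String := ("he said ``hi'' - bye", ["he", "said", "\"", "hi", "\"", "-", "bye"])

def Spec_make_tok_to_char (document : String) (tokens : List String) (out : List Int) : Prop := out = make_tok_to_char_alt document tokens
instance (document : String) (tokens : List String) (out : List Int) : Decidable (Spec_make_tok_to_char document tokens out) := by unfold Spec_make_tok_to_char; infer_instance

-- ===== CLAIM (what is proved, stated in full; the proofs are below) =====
def Claim_equal_make_tok_to_char : Prop := ∀ (document : String) (tokens : List String), Dom_make_tok_to_char document tokens → Pre_make_tok_to_char document tokens → Spec_make_tok_to_char document tokens (make_tok_to_char document tokens)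

-- ===== LEMMAS AND PROOFS =====

-- the occurrence test both sides use, as a prefix statement
theorem pv_occ_iff (doc x : List Char) (p : Nat) :
    ((doc.drop p).take x.length == x) = true ↔ x <+: doc.drop p := by
  rw [beq_iff_eq, List.prefix_iff_eq_take, eq_comm]

theorem pv_matches_ne (doc : List Char) (p : Nat) (pres : List (List Char)) :
    ¬ pvMatchesAt doc p pres = [] ↔ ∃ x ∈ pres, x <+: doc.drop p := by
  rw [pvMatchesAt, List.filter_eq_nil_iff]
  push Not
  simp only [pv_occ_iff]

-- pvScanA finds the first i' ≥ i with a match, none if there is none up to len(doc)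
theorem pvScanA_spec (doc : List Char) (pres : List (List Char)) (i : Nat) (hi : i ≤ doc.length) :
    (pvScanA doc pres i = none ∧ ∀ k, i ≤ k → k ≤ doc.length → pvMatchesAt doc k pres = [])
    ∨ (∃ j, pvScanA doc pres i = some j ∧ i ≤ j ∧ j ≤ doc.length ∧ pvMatchesAt doc j pres ≠ [] ∧
        ∀ k, i ≤ k → k < j → pvMatchesAt doc k pres = []) := by
  have H : ∀ (n i : Nat), doc.length - i ≤ n → i ≤ doc.length →
      (pvScanA doc pres i = none ∧ ∀ k, i ≤ k → k ≤ doc.length → pvMatchesAt doc k pres = [])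
      ∨ (∃ j, pvScanA doc pres i = some j ∧ i ≤ j ∧ j ≤ doc.length ∧ pvMatchesAt doc j pres ≠ [] ∧
          ∀ k, i ≤ k → k < j → pvMatchesAt doc k pres = []) := by
    intro n
    induction n with
    | zero =>
      intro i hn hi
      have hil : i = doc.length := by omega
      rw [pvScanA]
      by_cases hm : pvMatchesAt doc i pres ≠ []
      · right; exact ⟨i, by simp [hm], le_refl i, hi, hm, fun k h1 h2 => absurd h1 (by omega)⟩
      · left
        simp only [hm, ite_false]
        push Not at hm
        refine ⟨by simp [hil], fun k h1 h2 => ?_⟩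
        have : k = i := by omega
        simpa [this] using hm
    | succ n ih =>
      intro i hn hi
      rw [pvScanA]
      by_cases hm : pvMatchesAt doc i pres ≠ []
      · right; exact ⟨i, by simp [hm], le_refl i, hi, hm, fun k h1 h2 => absurd h1 (by omega)⟩
      · push Not at hm
        simp only [hm]
        by_cases hlen : doc.length < i + 1
        · left
          simp only [hlen, ite_true]
          refine ⟨by simp, fun k h1 h2 => ?_⟩
          have : k = i := by omega
          simpa [this] using hm
        · have hi1 : i + 1 ≤ doc.length := by omega
          rcases ih (i+1) (by omega) hi1 with ⟨h1, h2⟩ | ⟨j, h1, h2, h3, h4, h5⟩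
          · left
            simp only [hlen, ite_false]
            refine ⟨by simpa using h1, fun k hk1 hk2 => ?_⟩
            rcases Nat.eq_or_lt_of_le hk1 with h | h
            · simpa [← h] using hm
            · exact h2 k (by omega) hk2
          · right
            refine ⟨j, ?_, by omega, h3, h4, fun k hk1 hk2 => ?_⟩
            · simpa [hlen] using h1
            · rcases Nat.eq_or_lt_of_le hk1 with h | h
              · simpa [← h] using hm
              · exact h5 k (by omega) hk2
  exact H (doc.length - i) i (le_refl _) hi

-- findFrom returns exactly the first occurrence position ≥ i
theorem pv_findFrom_eq (doc x : List Char) (i j : Nat) (hi : i ≤ doc.length)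
    (hij : i ≤ j) (hocc : x <+: doc.drop j)
    (hmin : ∀ k, i ≤ k → k < j → ¬ x <+: doc.drop k) :
    PySem.Chars.findFrom doc x (i : Int) = (j : Int) := by
  have hinf : x <:+: doc.drop i := by
    have hd : doc.drop j = List.drop (j - i) (doc.drop i) := by
      rw [List.drop_drop]; congr 1; omega
    rw [hd] at hocc
    exact hocc.isInfix.trans (List.drop_suffix _ _).isInfix
  have hne : PySem.Chars.findFrom doc x (i : Int) ≠ -1 := by
    intro hcon
    exact ((PySem.Chars.findFrom_natCast_eq_neg_one_iff doc x i hi).mp hcon) hinf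
  obtain ⟨h1, h2, h3⟩ := PySem.Chars.findFrom_natCast_spec doc x i hi hne
  set p := PySem.Chars.findFrom doc x (i : Int) with hp
  have hge : j ≤ p.toNat := by
    by_contra h
    exact hmin p.toNat (by omega) (by omega) h2
  have hle : p.toNat ≤ j := by
    by_contra h
    exact h3 j hij (by omega) hocc
  omega

-- a successful findFrom lands in [i, len] on an occurrence
theorem pv_findFrom_pos (doc x : List Char) (i : Nat) (hi : i ≤ doc.length)
    (hne : PySem.Chars.findFrom doc x (i : Int) ≠ -1) :
    (i : Int) ≤ PySem.Chars.findFrom doc x (i : Int) ∧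
    (PySem.Chars.findFrom doc x (i : Int)).toNat ≤ doc.length ∧
    x <+: doc.drop (PySem.Chars.findFrom doc x (i : Int)).toNat := by
  obtain ⟨h1, h2, h3⟩ := PySem.Chars.findFrom_natCast_spec doc x i hi hne
  refine ⟨h1, ?_, h2⟩
  set p := PySem.Chars.findFrom doc x (i : Int) with hp
  rcases eq_or_ne x [] with rfl | hx
  · by_contra h
    exact h3 i (le_refl i) (by omega) List.nil_prefix
  · by_contra h
    have hd : doc.drop p.toNat = [] := List.drop_eq_nil_of_le (by omega)
    rw [hd, List.prefix_nil] at h2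
    exact hx h2

-- the minimum value kept by min? (library characterization, antisymmetry)
theorem pv_min?_eq (xs : List Int) (m : Int) (hm : m ∈ xs) (hle : ∀ q ∈ xs, m ≤ q) :
    PySem.List.min? xs id = some m := by
  obtain ⟨m', hm'⟩ : ∃ m', PySem.List.min? xs id = some m' := by
    cases h : PySem.List.min? xs id
    · rw [PySem.List.min?_eq_none_iff] at h
      subst h; simp at hm
    · exact ⟨_, rfl⟩
  have h1 := PySem.List.min?_mem hm'
  have h2 := PySem.List.min?_isMin hm' m hm
  have h3 := hle m' h1
  rw [hm']
  simp only [id] at h2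
  congr 1
  omega

-- one token: B's find/min/find? step equals A's char-by-char scan
theorem pvStep_eq (doc : List Char) (pres : List (List Char)) (i : Nat) (hi : i ≤ doc.length) :
    pvStepB doc (i : Int) pres =
      match pvScanA doc pres i with
      | none => none
      | some j =>
        match pvMatchesAt doc j pres with
        | [] => none
        | x :: _ => some ((j : Int), x.length) := by
  rcases pvScanA_spec doc pres i hi with ⟨h1, h2⟩ | ⟨j, h1, hij, hjl, hne, hmin⟩
  · rw [h1]
    have hpos : ((pres.map (fun x => PySem.Chars.findFrom doc x (i : Int))).filter (fun p => p != -1)) = [] := by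
      rw [List.filter_eq_nil_iff]
      intro q hq
      obtain ⟨x, hx, rfl⟩ := List.mem_map.mp hq
      simp only [bne_iff_ne, ne_eq, not_not]
      by_contra hneq
      obtain ⟨hq1, hq2, hq3⟩ := pv_findFrom_pos doc x i hi hneq
      exact (pv_matches_ne doc _ pres).mpr ⟨x, hx, hq3⟩
        (h2 (PySem.Chars.findFrom doc x (i : Int)).toNat (by omega) hq2)
    simp only [pvStepB, hpos]
    rfl
  · obtain ⟨x₀, hx₀, hocc₀⟩ := (pv_matches_ne doc j pres).mp hne
    have hminx : ∀ k, i ≤ k → k < j → ¬ x₀ <+: doc.drop k := fun k hk1 hk2 hpre =>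
      (pv_matches_ne doc k pres).mpr ⟨x₀, hx₀, hpre⟩ (hmin k hk1 hk2)
    have hfind0 : PySem.Chars.findFrom doc x₀ (i : Int) = (j : Int) :=
      pv_findFrom_eq doc x₀ i j hi hij hocc₀ hminx
    have hmem : (j : Int) ∈ ((pres.map (fun x => PySem.Chars.findFrom doc x (i : Int))).filter (fun p => p != -1)) := by
      rw [List.mem_filter]
      refine ⟨List.mem_map.mpr ⟨x₀, hx₀, hfind0⟩, ?_⟩
      simp only [bne_iff_ne, ne_eq]
      omega
    have hlb : ∀ q ∈ ((pres.map (fun x => PySem.Chars.findFrom doc x (i : Int))).filter (fun p => p != -1)), (j : Int) ≤ q := by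
      intro q hq
      obtain ⟨hq1, hq2⟩ := List.mem_filter.mp hq
      obtain ⟨x', hx', rfl⟩ := List.mem_map.mp hq1
      have hneq : PySem.Chars.findFrom doc x' (i : Int) ≠ -1 := by
        simpa [bne_iff_ne] using hq2
      obtain ⟨ha, hb, hc⟩ := pv_findFrom_pos doc x' i hi hneq
      have hPk : ¬ pvMatchesAt doc (PySem.Chars.findFrom doc x' (i : Int)).toNat pres = [] :=
        (pv_matches_ne doc _ pres).mpr ⟨x', hx', hc⟩
      have : ¬ (PySem.Chars.findFrom doc x' (i : Int)).toNat < j := fun hlt =>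
        hPk (hmin _ (by omega) hlt)
      omega
    have hminval : PySem.List.min? ((pres.map (fun x => PySem.Chars.findFrom doc x (i : Int))).filter (fun p => p != -1)) id
        = some (j : Int) := pv_min?_eq _ _ hmem hlb
    rw [h1]
    simp only [pvStepB, hminval]
    have hsl : (fun (x : List Char) => PySem.List.slice doc (some ((j : Int))) (some ((j : Int) + (x.length : Int))) == x)
        = (fun (x : List Char) => (doc.drop j).take x.length == x) := by
      funext x
      rw [PySem.List.slice_natCast_add]
    rw [hsl, ← List.head?_filter]
    have hfm : pres.filter (fun (x : List Char) => (doc.drop j).take x.length == x) = pvMatchesAt doc j pres := rfl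
    rw [hfm]
    cases hM : pvMatchesAt doc j pres with
    | nil => exact absurd hM hne
    | cons x r => rfl

theorem pvLoop_eq (doc : List Char) (ts : List String) : ∀ (i : Nat), i ≤ doc.length →
    pvLoopB doc (i : Int) ts = (pvLoopA doc i ts).map (List.map Int.ofNat) := by
  induction ts with
  | nil =>
    intro i hi
    simp [pvLoopA, pvLoopB]
  | cons t ts ih =>
    intro i hi
    simp only [pvLoopA, pvLoopB]
    rw [pvStep_eq doc ((get_preimages t).map String.toList) i hi]
    rcases pvScanA_spec doc ((get_preimages t).map String.toList) i hi with ⟨h1, _⟩ | ⟨j, h1, hij, hjl, hne, _⟩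
    · rw [h1]
      rfl
    · rw [h1]
      cases hM : pvMatchesAt doc j ((get_preimages t).map String.toList) with
      | nil => exact absurd hM hne
      | cons x r =>
        have hxm : x ∈ pvMatchesAt doc j ((get_preimages t).map String.toList) := by
          rw [hM]; exact List.mem_cons_self
        have hpred := (List.mem_filter.mp hxm).2
        have hlen : j + x.length ≤ doc.length := by
          have hTake := congrArg List.length (beq_iff_eq.mp hpred)
          simp only [List.length_take, List.length_drop] at hTake
          omega
        have hcast : ((j : Int) + (x.length : Int)) = ((j + x.length : Nat) : Int) := by push_cast; ring
        have hrec : pvLoopB doc ((j : Int) + (x.length : Int)) ts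
            = Option.map (List.map Int.ofNat) (pvLoopA doc (j + x.length) ts) := by
          rw [hcast]; exact ih (j + x.length) hlen
        simp only [hM, hrec]
        cases pvLoopA doc (j + x.length) ts <;> simp

-- ===== VERDICT (by name: the statement is the Claim_ definition above) =====
theorem make_tok_to_char_spec : Claim_equal_make_tok_to_char := by
  intro document tokens _ _
  unfold Spec_make_tok_to_char make_tok_to_char make_tok_to_char_alt
  have h := pvLoop_eq document.toList tokens 0 (Nat.zero_le _)
  rw [show (0 : Int) = ((0 : Nat) : Int) by norm_num, h]
  cases pvLoopA document.toList 0 tokens <;> simp
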